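-- pv_equiv track=rewrite | github.com/readerbench/ReaderBench | rb/similarity/StringKernels.py | compute_kernel_two_strings_clusters2
-- ===== SOURCE A (Python) =====
-- from collections import Counter
--
-- def compute_kernel_two_strings_clusters2(string1, string2, ngram_range_min, ngram_range_max, clusters):
--
--     index = 0
--     clusters_dict = {}
--     for cluster in clusters:
--         for ngram in cluster:
--             clusters_dict[ngram] = index
--         index += 1
--
--     s1_ngram = Counter()
--     s2_ngram = Counter()
--
--     for char_index, char in enumerate(string1):
--         for d in range(ngram_range_min, ngram_range_max + 1):
--             if char_index + d <= len(string1):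
--                 ngram = string1[char_index:char_index + d]
--                 if ngram not in clusters_dict:
--                     clusters_dict[ngram] = index
--                     index += 1
--                 s1_ngram[clusters_dict[ngram]] += 1
--
--     for char_index, char in enumerate(string2):
--         for d in range(ngram_range_min, ngram_range_max + 1):
--             if char_index + d <= len(string2):
--                 ngram = string2[char_index:char_index + d]
--                 if ngram not in clusters_dict:
--                     clusters_dict[ngram] = index
--                     index += 1
--                 s2_ngram[clusters_dict[ngram]] += 1
--
--     kernel = 0
--     for c in s1_ngram:
--         if s1_ngram[c] * s2_ngram[c] >= 1:
--             kernel += 1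
--     return kernel
-- ===== SOURCE B (Python) =====
-- def _merge_count(a, b):
--     i = j = k = 0
--     while i < len(a) and j < len(b):
--         if a[i] == b[j]:
--             k += 1
--             i += 1
--             j += 1
--         elif a[i] < b[j]:
--             i += 1
--         else:
--             j += 1
--     return k
--
--
-- def compute_kernel_two_strings_clusters2(string1, string2, ngram_range_min, ngram_range_max, clusters):
--     cmap = {g: cid for cid, cluster in enumerate(clusters) for g in cluster}
--
--     def parts(s):
--         cids, raws = set(), set()
--         for i in range(len(s)):
--             for d in range(ngram_range_min, ngram_range_max + 1):
--                 if i + d <= len(s):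
--                     g = s[i:i + d]
--                     if g in cmap:
--                         cids.add(cmap[g])
--                     else:
--                         raws.add(g)
--         return sorted(cids), sorted(raws)
--
--     c1, r1 = parts(string1)
--     c2, r2 = parts(string2)
--     return _merge_count(c1, c2) + _merge_count(r1, r2)
-- ===== Notes on version B (the rewrite author's own statement) =====
-- stated objective: alternative
-- what changed: Replaces A's mutable running-id counter, growing dict and per-id Counters with a pure partition of each string's n-grams into cluster-ids and unclustered n-grams, which are sorted and the common elements counted by a two-pointer merge of the sorted deduplicated lists.
import Mathlib
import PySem

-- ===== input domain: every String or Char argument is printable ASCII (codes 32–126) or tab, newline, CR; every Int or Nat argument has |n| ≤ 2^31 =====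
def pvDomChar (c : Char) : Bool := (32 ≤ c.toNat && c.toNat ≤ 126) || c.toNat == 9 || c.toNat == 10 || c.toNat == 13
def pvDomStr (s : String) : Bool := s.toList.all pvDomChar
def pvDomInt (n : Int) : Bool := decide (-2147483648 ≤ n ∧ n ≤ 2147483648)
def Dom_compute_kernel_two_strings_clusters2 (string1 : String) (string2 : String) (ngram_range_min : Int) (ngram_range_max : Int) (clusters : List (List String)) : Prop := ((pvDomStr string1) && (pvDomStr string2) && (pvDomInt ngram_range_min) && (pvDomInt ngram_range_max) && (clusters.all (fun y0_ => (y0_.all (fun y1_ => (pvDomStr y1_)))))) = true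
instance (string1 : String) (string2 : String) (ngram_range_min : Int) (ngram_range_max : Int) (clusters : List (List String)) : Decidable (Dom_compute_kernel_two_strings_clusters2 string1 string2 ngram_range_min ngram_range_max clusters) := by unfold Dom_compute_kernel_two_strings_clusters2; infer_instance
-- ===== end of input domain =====

-- B replaces A's mutable running-id counter and per-id Counters by partitioning each string's
-- n-grams into cluster ids and unclustered n-grams and counting the common elements of each
-- part by a two-pointer merge of the sorted deduplicated lists.

-- ===== PORT A =====
-- body of A's inner string loop: if ngram not in clusters_dict: clusters_dict[ngram] = index; index += 1;
-- s_ngram[clusters_dict[ngram]] += 1  (state = (clusters_dict, index, s_ngram); the lookup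
-- clusters_dict[ngram] is (get? …).getD 0, exact because the key is present at that point)
def pvAStepNgram (st : PySem.Dict String Int × Int × PySem.Dict Int Int) (ngram : String) :
    PySem.Dict String Int × Int × PySem.Dict Int Int :=
  let st' := if st.1.contains ngram then st else (st.1.insert ngram st.2.1, st.2.1 + 1, st.2.2)
  (st'.1, st'.2.1, st'.2.2.modify ((st'.1.get? ngram).getD 0) 0 (· + 1))

def compute_kernel_two_strings_clusters2 (string1 : String) (string2 : String) (ngram_range_min : Int) (ngram_range_max : Int) (clusters : List (List String)) : Int :=
  let di : PySem.Dict String Int × Int :=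
    clusters.foldl (fun st cluster =>
      (cluster.foldl (fun d ngram => d.insert ngram st.2) st.1, st.2 + 1))
      (PySem.Dict.empty, 0)
  let st1 :=
    (PySem.List.enumerate string1.toList).foldl (fun st p =>
      (PySem.List.pyRange ngram_range_min (ngram_range_max + 1) 1).foldl (fun st d =>
        if p.1 + d ≤ PySem.Str.len string1 then
          pvAStepNgram st (PySem.Str.slice string1 (some p.1) (some (p.1 + d)))
        else st) st)
      (di.1, di.2, PySem.Dict.empty)
  let st2 :=
    (PySem.List.enumerate string2.toList).foldl (fun st p =>
      (PySem.List.pyRange ngram_range_min (ngram_range_max + 1) 1).foldl (fun st d =>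
        if p.1 + d ≤ PySem.Str.len string2 then
          pvAStepNgram st (PySem.Str.slice string2 (some p.1) (some (p.1 + d)))
        else st) st)
      (st1.1, st1.2.1, PySem.Dict.empty)
  st1.2.2.keys.foldl (fun kernel c =>
    if st1.2.2.getD c 0 * st2.2.2.getD c 0 ≥ 1 then kernel + 1 else kernel) 0

-- ===== PORT B =====
-- Source B's _merge_count: two-pointer merge of two sorted lists, counting equal elements
-- (advancing an index over an immutable list = dropping its head)
def pvMergeCount {α : Type} [LinearOrder α] : List α → List α → Int
  | a :: as, b :: bs =>
      if a = b then 1 + pvMergeCount as bs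
      else if a < b then pvMergeCount as (b :: bs)
      else pvMergeCount (a :: as) bs
  | _, _ => 0
termination_by a b => a.length + b.length
decreasing_by all_goals simp <;> omega

-- Source B's nested helper 'parts': partition the window n-grams of s into the set of cluster
-- ids of clustered n-grams and the set of unclustered n-grams, each returned sorted
def pvParts (cmap : PySem.Dict String Int) (s : String) (mn mx : Int) :
    List Int × List String :=
  let p := (PySem.List.pyRange 0 (PySem.Str.len s) 1).foldl (fun acc i =>
    (PySem.List.pyRange mn (mx + 1) 1).foldl (fun acc d =>
      if i + d ≤ PySem.Str.len s then
        let g := PySem.Str.slice s (some i) (some (i + d))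
        match cmap.get? g with
        | some c => (PySem.Set.add acc.1 c, acc.2)
        | none => (acc.1, PySem.Set.add acc.2 g)
      else acc) acc)
    ((PySem.Set.empty : PySem.Set Int), (PySem.Set.empty : PySem.Set String))
  (PySem.List.sorted p.1 (fun x => x) false, PySem.List.sorted p.2 (fun x => x) false)

def compute_kernel_two_strings_clusters2_alt (string1 : String) (string2 : String) (ngram_range_min : Int) (ngram_range_max : Int) (clusters : List (List String)) : Int :=
  let cmap := (PySem.List.enumerate clusters).foldl
    (fun d p => p.2.foldl (fun d ngram => d.insert ngram p.1) d) PySem.Dict.empty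
  let p1 := pvParts cmap string1 ngram_range_min ngram_range_max
  let p2 := pvParts cmap string2 ngram_range_min ngram_range_max
  pvMergeCount p1.1 p2.1 + pvMergeCount p1.2 p2.2

-- ===== PRECONDITION & SPEC =====
def Spec_compute_kernel_two_strings_clusters2 (string1 : String) (string2 : String) (ngram_range_min : Int) (ngram_range_max : Int) (clusters : List (List String)) (out : Int) : Prop := out = compute_kernel_two_strings_clusters2_alt string1 string2 ngram_range_min ngram_range_max clusters
instance (string1 : String) (string2 : String) (ngram_range_min : Int) (ngram_range_max : Int) (clusters : List (List String)) (out : Int) : Decidable (Spec_compute_kernel_two_strings_clusters2 string1 string2 ngram_range_min ngram_range_max clusters out) := by unfold Spec_compute_kernel_two_strings_clusters2; infer_instance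

-- ===== CLAIM (what is proved, stated in full; the proofs are below) =====
def Claim_equal_compute_kernel_two_strings_clusters2 : Prop := ∀ (string1 : String) (string2 : String) (ngram_range_min : Int) (ngram_range_max : Int) (clusters : List (List String)), Dom_compute_kernel_two_strings_clusters2 string1 string2 ngram_range_min ngram_range_max clusters → Spec_compute_kernel_two_strings_clusters2 string1 string2 ngram_range_min ngram_range_max clusters (compute_kernel_two_strings_clusters2 string1 string2 ngram_range_min ngram_range_max clusters)

-- ===== LEMMAS AND PROOFS =====

-- the flattened list of n-grams both loops slide over
def pvNgrams (mn mx : Int) (s : String) : List String :=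
  (PySem.List.enumerate s.toList).flatMap (fun p =>
    ((PySem.List.pyRange mn (mx + 1) 1).filter (fun d => decide (p.1 + d ≤ PySem.Str.len s))).map
      (fun d => PySem.Str.slice s (some p.1) (some (p.1 + d))))

lemma pvEnumerate_map_fst {α : Type} : ∀ (xs : List α) (k : Int),
    (PySem.List.enumerate xs k).map Prod.fst = PySem.List.pyRange k (k + xs.length) 1 := by
  intro xs
  induction xs with
  | nil => intro k; simp [PySem.List.enumerate, PySem.List.pyRange_one_eq_nil]
  | cons x t ih =>
    intro k
    have hb : (k + ((x :: t).length : Int)) = (k + 1) + (t.length : Int) := by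
      simp only [List.length_cons]; push_cast; ring
    conv_rhs => rw [hb, PySem.List.pyRange_one_cons (by omega)]
    rw [show PySem.List.enumerate (x :: t) k = (k, x) :: PySem.List.enumerate t (k + 1) from rfl]
    rw [List.map_cons, ih]

lemma pvMemEnumerate {α : Type} : ∀ (xs : List α) (k : Int) (p : Int × α),
    p ∈ PySem.List.enumerate xs k → k ≤ p.1 ∧ p.1 < k + xs.length := by
  intro xs
  induction xs with
  | nil => intro k p h; simp [PySem.List.enumerate] at h
  | cons x t ih =>
    intro k p h
    rw [show PySem.List.enumerate (x :: t) k = (k, x) :: PySem.List.enumerate t (k + 1) from rfl] at h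
    simp only [List.length_cons]
    rcases List.mem_cons.mp h with h | h
    · subst h; push_cast; omega
    · have := ih (k + 1) p h
      push_cast at this ⊢
      omega

-- A's phase-2 loop over one string, flattened
lemma pvFoldA_flatten (s : String) (mn mx : Int) (st : PySem.Dict String Int × Int × PySem.Dict Int Int) :
    (PySem.List.enumerate s.toList).foldl (fun st p =>
      (PySem.List.pyRange mn (mx + 1) 1).foldl (fun st d =>
        if p.1 + d ≤ PySem.Str.len s then
          pvAStepNgram st (PySem.Str.slice s (some p.1) (some (p.1 + d)))
        else st) st) st
    = (pvNgrams mn mx s).foldl pvAStepNgram st := by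
  rw [pvNgrams, List.foldl_flatMap]
  refine PySem.List.foldl_congr_mem _ _ _ _ (fun acc p _ => ?_)
  rw [List.foldl_map, PySem.List.foldl_ite_eq_foldl_filter (fun d => p.1 + d ≤ PySem.Str.len s)]

-- B's parts loop: the two independent set accumulators, as separate folds
def pvStepC (cmap : PySem.Dict String Int) (s : PySem.Set Int) (g : String) : PySem.Set Int :=
  match cmap.get? g with
  | some c => PySem.Set.add s c
  | none => s

def pvStepR (cmap : PySem.Dict String Int) (s : PySem.Set String) (g : String) : PySem.Set String :=
  match cmap.get? g with
  | some _ => s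
  | none => PySem.Set.add s g

lemma pvParts_eq (cmap : PySem.Dict String Int) (s : String) (mn mx : Int) :
    pvParts cmap s mn mx =
      (PySem.List.sorted ((pvNgrams mn mx s).foldl (pvStepC cmap) PySem.Set.empty) (fun x => x) false,
       PySem.List.sorted ((pvNgrams mn mx s).foldl (pvStepR cmap) PySem.Set.empty) (fun x => x) false) := by
  have hsp : PySem.List.pyRange 0 (PySem.Str.len s) 1
      = (PySem.List.enumerate s.toList).map Prod.fst := by
    rw [pvEnumerate_map_fst]; congr 1; simp [PySem.Str.len]
  have hflat : (PySem.List.pyRange 0 (PySem.Str.len s) 1).foldl (fun acc i =>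
      (PySem.List.pyRange mn (mx + 1) 1).foldl (fun acc d =>
        if i + d ≤ PySem.Str.len s then
          (match cmap.get? (PySem.Str.slice s (some i) (some (i + d))) with
           | some c => (PySem.Set.add acc.1 c, acc.2)
           | none => (acc.1, PySem.Set.add acc.2 (PySem.Str.slice s (some i) (some (i + d)))))
        else acc) acc)
      ((PySem.Set.empty : PySem.Set Int), (PySem.Set.empty : PySem.Set String))
      = (pvNgrams mn mx s).foldl
          (fun acc g => (pvStepC cmap acc.1 g, pvStepR cmap acc.2 g))
          (PySem.Set.empty, PySem.Set.empty) := by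
    rw [pvNgrams, List.foldl_flatMap, hsp, List.foldl_map]
    refine PySem.List.foldl_congr_mem _ _ _ _ (fun acc p _ => ?_)
    rw [List.foldl_map, PySem.List.foldl_ite_eq_foldl_filter (fun d => p.1 + d ≤ PySem.Str.len s)]
    refine PySem.List.foldl_congr_mem _ _ _ _ (fun acc d _ => ?_)
    cases h : cmap.get? (PySem.Str.slice s (some p.1) (some (p.1 + d))) <;>
      simp [pvStepC, pvStepR, h]
  rw [pvParts]
  simp only [hflat, PySem.List.foldl_prod_mk]

lemma pvMemFoldC (cmap : PySem.Dict String Int) : ∀ (L : List String) (acc : PySem.Set Int) (i : Int),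
    i ∈ L.foldl (pvStepC cmap) acc ↔ i ∈ acc ∨ ∃ g ∈ L, cmap.get? g = some i := by
  intro L
  induction L with
  | nil => intro acc i; simp
  | cons x t ih =>
    intro acc i
    rw [List.foldl_cons, ih]
    cases h : cmap.get? x with
    | none =>
      simp only [pvStepC, h, List.mem_cons]
      constructor
      · rintro (ha | ⟨g, hg, he⟩)
        · exact Or.inl ha
        · exact Or.inr ⟨g, Or.inr hg, he⟩
      · rintro (ha | ⟨g, (rfl | hg), he⟩)
        · exact Or.inl ha
        · rw [h] at he; cases he
        · exact Or.inr ⟨g, hg, he⟩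
    | some c =>
      simp only [pvStepC, h, PySem.Set.mem_add, List.mem_cons]
      constructor
      · rintro ((ha | rfl) | ⟨g, hg, he⟩)
        · exact Or.inl ha
        · exact Or.inr ⟨x, Or.inl rfl, h⟩
        · exact Or.inr ⟨g, Or.inr hg, he⟩
      · rintro (ha | ⟨g, (rfl | hg), he⟩)
        · exact Or.inl (Or.inl ha)
        · rw [h] at he; exact Or.inl (Or.inr (Option.some.inj he).symm)
        · exact Or.inr ⟨g, hg, he⟩

lemma pvMemFoldR (cmap : PySem.Dict String Int) : ∀ (L : List String) (acc : PySem.Set String) (x : String),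
    x ∈ L.foldl (pvStepR cmap) acc ↔ x ∈ acc ∨ (x ∈ L ∧ cmap.get? x = none) := by
  intro L
  induction L with
  | nil => intro acc x; simp
  | cons y t ih =>
    intro acc x
    rw [List.foldl_cons, ih]
    cases h : cmap.get? y with
    | some c =>
      simp only [pvStepR, h, List.mem_cons]
      constructor
      · rintro (ha | ⟨hm, he⟩)
        · exact Or.inl ha
        · exact Or.inr ⟨Or.inr hm, he⟩
      · rintro (ha | ⟨(rfl | hm), he⟩)
        · exact Or.inl ha
        · rw [h] at he; cases he
        · exact Or.inr ⟨hm, he⟩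
    | none =>
      simp only [pvStepR, h, PySem.Set.mem_add, List.mem_cons]
      constructor
      · rintro ((ha | rfl) | ⟨hm, he⟩)
        · exact Or.inl ha
        · exact Or.inr ⟨Or.inl rfl, h⟩
        · exact Or.inr ⟨Or.inr hm, he⟩
      · rintro (ha | ⟨(rfl | hm), he⟩)
        · exact Or.inl (Or.inl ha)
        · exact Or.inl (Or.inr rfl)
        · exact Or.inr ⟨hm, he⟩

lemma pvNodupFoldC (cmap : PySem.Dict String Int) : ∀ (L : List String) (acc : PySem.Set Int),
    acc.Nodup → (L.foldl (pvStepC cmap) acc).Nodup := by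
  intro L
  induction L with
  | nil => intro acc h; exact h
  | cons x t ih =>
    intro acc h
    rw [List.foldl_cons]
    refine ih _ ?_
    cases hx : cmap.get? x <;> simp only [pvStepC, hx]
    · exact h
    · exact PySem.Set.nodup_add _ _ h

lemma pvNodupFoldR (cmap : PySem.Dict String Int) : ∀ (L : List String) (acc : PySem.Set String),
    acc.Nodup → (L.foldl (pvStepR cmap) acc).Nodup := by
  intro L
  induction L with
  | nil => intro acc h; exact h
  | cons x t ih =>
    intro acc h
    rw [List.foldl_cons]
    refine ih _ ?_
    cases hx : cmap.get? x <;> simp only [pvStepR, hx]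
    · exact PySem.Set.nodup_add _ _ h
    · exact h

-- the merge-count core: on strictly increasing lists it counts the intersection
lemma pvPairwiseLt {α : Type} [LinearOrder α] (l : List α)
    (h1 : l.Pairwise (· ≤ ·)) (h2 : l.Nodup) : l.Pairwise (· < ·) :=
  (h1.and h2).imp (fun h => lt_of_le_of_ne h.1 h.2)

lemma pvMergeCount_eq {α : Type} [LinearOrder α] [DecidableEq α] :
    ∀ (a b : List α), a.Pairwise (· < ·) → b.Pairwise (· < ·) →
      pvMergeCount a b = ((a.toFinset ∩ b.toFinset).card : Int) := by
  intro a
  induction a with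
  | nil => intro b _ _; cases b <;> simp [pvMergeCount]
  | cons x xs ihx =>
    intro b
    induction b with
    | nil => intro _ _; simp [pvMergeCount]
    | cons y ys ihy =>
      intro ha hb
      obtain ⟨hxlt, ha'⟩ := List.pairwise_cons.mp ha
      obtain ⟨hylt, hb'⟩ := List.pairwise_cons.mp hb
      rw [pvMergeCount]
      by_cases hxy : x = y
      · subst hxy
        rw [if_pos rfl, ihx ys ha' hb']
        have hxnx : x ∉ xs.toFinset := by
          rw [List.mem_toFinset]; intro hm; exact absurd rfl (ne_of_gt (hxlt x hm))
        have hxny : x ∉ ys.toFinset := by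
          rw [List.mem_toFinset]; intro hm; exact absurd rfl (ne_of_gt (hylt x hm))
        rw [List.toFinset_cons, List.toFinset_cons,
          Finset.insert_inter_of_mem (Finset.mem_insert_self x ys.toFinset),
          Finset.inter_insert_of_notMem hxnx,
          Finset.card_insert_of_notMem (by
            rw [Finset.mem_inter]; rintro ⟨h1, _⟩; exact hxnx h1)]
        push_cast; ring
      · rcases lt_or_gt_of_ne hxy with hlt | hgt
        · rw [if_neg hxy, if_pos hlt, ihx (y :: ys) ha' hb]
          have hxn : x ∉ (y :: ys).toFinset := by
            rw [List.mem_toFinset, List.mem_cons]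
            rintro (rfl | hm)
            · exact absurd rfl (ne_of_lt hlt)
            · exact absurd rfl (ne_of_lt (lt_trans hlt (hylt x hm)))
          rw [List.toFinset_cons (a := x), Finset.insert_inter_of_notMem hxn]
        · rw [if_neg hxy, if_neg (not_lt.mpr hgt.le), ihy ha hb']
          have hyn : y ∉ (x :: xs).toFinset := by
            rw [List.mem_toFinset, List.mem_cons]
            rintro (rfl | hm)
            · exact absurd rfl (ne_of_gt hgt)
            · exact absurd rfl (ne_of_lt (lt_trans hgt (hxlt y hm)))
          rw [List.toFinset_cons (a := y), Finset.inter_insert_of_notMem hyn]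

-- phase 1: A's running-index fold and B's enumerate fold build the same dict
lemma pvPhase1_eq : ∀ (clusters : List (List String)) (d : PySem.Dict String Int) (k : Int),
    clusters.foldl (fun st cluster =>
      (cluster.foldl (fun d ngram => d.insert ngram st.2) st.1, st.2 + 1)) (d, k)
    = ((PySem.List.enumerate clusters k).foldl
        (fun d p => p.2.foldl (fun d ngram => d.insert ngram p.1) d) d,
       k + clusters.length) := by
  intro clusters
  induction clusters with
  | nil => intro d k; simp [PySem.List.enumerate]
  | cons c cs ih =>
    intro d k
    rw [show PySem.List.enumerate (c :: cs) k = (k, c) :: PySem.List.enumerate cs (k + 1) from rfl]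
    simp only [List.foldl_cons, ih]
    refine Prod.ext rfl ?_
    simp only [List.length_cons]; push_cast; ring

lemma pvVal1 : ∀ (cl : List String) (v : Int) (d : PySem.Dict String Int) (g : String) (i : Int),
    (cl.foldl (fun d g' => d.insert g' v) d).get? g = some i → i = v ∨ d.get? g = some i := by
  intro cl
  induction cl with
  | nil => intro v d g i h; exact Or.inr h
  | cons x t ih =>
    intro v d g i h
    rw [List.foldl_cons] at h
    rcases ih v _ g i h with h' | h'
    · exact Or.inl h'
    · rw [PySem.Dict.get?_insert] at h'
      split at h'
      · exact Or.inl (Option.some.inj h').symm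
      · exact Or.inr h'

lemma pvVal2 : ∀ (l : List (Int × List String)) (d : PySem.Dict String Int) (g : String) (i : Int),
    (l.foldl (fun d p => p.2.foldl (fun d g' => d.insert g' p.1) d) d).get? g = some i →
    (∃ p ∈ l, i = p.1) ∨ d.get? g = some i := by
  intro l
  induction l with
  | nil => intro d g i h; exact Or.inr h
  | cons x t ih =>
    intro d g i h
    rw [List.foldl_cons] at h
    rcases ih _ g i h with h' | h'
    · rcases h' with ⟨p, hp, he⟩; exact Or.inl ⟨p, List.mem_cons_of_mem _ hp, he⟩
    · rcases pvVal1 _ _ _ _ _ h' with h'' | h''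
      · exact Or.inl ⟨x, List.mem_cons_self, h''⟩
      · exact Or.inr h''

-- dict invariant through A's phase-2 loop
def pvInv (d0 : PySem.Dict String Int) (n0 : Int) (d : PySem.Dict String Int) (n : Int) : Prop :=
  (∀ g i, d.get? g = some i → d0.get? g = some i ∨ (n0 ≤ i ∧ i < n)) ∧
  (∀ g i, d0.get? g = some i → d.get? g = some i) ∧
  (∀ g1 g2 i, n0 ≤ i → d.get? g1 = some i → d.get? g2 = some i → g1 = g2) ∧
  n0 ≤ n

lemma pvMemKeysModify (c : PySem.Dict Int Int) (k i : Int) (f : Int → Int) :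
    i ∈ (c.modify k 0 f).keys ↔ i = k ∨ i ∈ c.keys := by
  rw [PySem.Dict.keys_modify, PySem.Dict.mem_keys_insert]

lemma pvNodupKeysModify (c : PySem.Dict Int Int) (k : Int) (f : Int → Int)
    (h : c.keys.Nodup) : (c.modify k 0 f).keys.Nodup := by
  rw [PySem.Dict.keys_modify]
  exact PySem.Dict.nodup_keys_insert _ _ _ h

lemma pvNotContainsOfNotMem (c : PySem.Dict Int Int) (i : Int) (h : i ∉ c.keys) :
    c.contains i = false := by
  cases hc : c.contains i
  · rfl
  · exact absurd ((PySem.Dict.contains_iff_mem_keys c i).mp hc) h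

lemma pvFoldA_inv (d0 : PySem.Dict String Int) (n0 : Int)
    (hd0 : ∀ g i, d0.get? g = some i → 0 ≤ i ∧ i < n0) :
    ∀ (L : List String) (d : PySem.Dict String Int) (n : Int) (c : PySem.Dict Int Int) (P : List String),
    pvInv d0 n0 d n →
    (∀ g ∈ P, (d.get? g).isSome) →
    (∀ i, i ∈ c.keys ↔ ∃ g ∈ P, d.get? g = some i) →
    (∀ i ∈ c.keys, 1 ≤ c.getD i 0) →
    c.keys.Nodup →
    pvInv d0 n0 (L.foldl pvAStepNgram (d, n, c)).1 (L.foldl pvAStepNgram (d, n, c)).2.1 ∧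
    (∀ g i, d.get? g = some i → (L.foldl pvAStepNgram (d, n, c)).1.get? g = some i) ∧
    (∀ g ∈ P ++ L, ((L.foldl pvAStepNgram (d, n, c)).1.get? g).isSome) ∧
    (∀ i, i ∈ (L.foldl pvAStepNgram (d, n, c)).2.2.keys ↔
      ∃ g ∈ P ++ L, (L.foldl pvAStepNgram (d, n, c)).1.get? g = some i) ∧
    (∀ i ∈ (L.foldl pvAStepNgram (d, n, c)).2.2.keys,
      1 ≤ (L.foldl pvAStepNgram (d, n, c)).2.2.getD i 0) ∧
    (L.foldl pvAStepNgram (d, n, c)).2.2.keys.Nodup := by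
  intro L
  induction L with
  | nil =>
    intro d n c P hinv hdom hchar hpos hnodup
    simp only [List.foldl_nil, List.append_nil]
    exact ⟨hinv, fun g i h => h, hdom, hchar, hpos, hnodup⟩
  | cons g L ih =>
    intro d n c P hinv hdom hchar hpos hnodup
    obtain ⟨hi1, hext0, hinj, hle⟩ := hinv
    rw [List.foldl_cons]
    have hposStep : ∀ (c' : PySem.Dict Int Int), (∀ i ∈ c'.keys, 1 ≤ c'.getD i 0) →
        ∀ (j : Int), ∀ i ∈ (c'.modify j 0 (· + 1)).keys, 1 ≤ (c'.modify j 0 (· + 1)).getD i 0 := by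
      intro c' hp j i hi
      rw [pvMemKeysModify] at hi
      rw [PySem.Dict.getD_modify]
      by_cases hij : i = j
      · rw [if_pos hij]
        by_cases hjk : j ∈ c'.keys
        · have := hp j hjk; omega
        · rw [PySem.Dict.getD_of_not_contains c' 0 (pvNotContainsOfNotMem c' j hjk)]; omega
      · rw [if_neg hij]
        rcases hi with h | h
        · exact absurd h hij
        · exact hp i h
    by_cases hc : d.contains g = true
    · -- ngram already a key: dict and index unchanged, counter bumped at its id
      obtain ⟨j, hj⟩ : ∃ j, d.get? g = some j := by
        cases h : d.get? g
        · rw [PySem.Dict.get?_eq_none_iff_contains] at h; rw [h] at hc; cases hc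
        · exact ⟨_, rfl⟩
      have hstep : pvAStepNgram (d, n, c) g = (d, n, c.modify j 0 (· + 1)) := by
        simp [pvAStepNgram, hc, hj]
      rw [hstep]
      have hres := ih d n (c.modify j 0 (· + 1)) (P ++ [g]) ⟨hi1, hext0, hinj, hle⟩
        (by intro g' hg'
            rcases List.mem_append.mp hg' with h | h
            · exact hdom g' h
            · simp only [List.mem_singleton] at h; subst h; simp [hj])
        (by intro i
            rw [pvMemKeysModify]
            constructor
            · rintro (rfl | hi)
              · exact ⟨g, by simp, hj⟩
              · obtain ⟨g', hg', he⟩ := (hchar i).mp hi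
                exact ⟨g', by simp [hg'], he⟩
            · rintro ⟨g', hg', he⟩
              rcases List.mem_append.mp hg' with h | h
              · exact Or.inr ((hchar i).mpr ⟨g', h, he⟩)
              · simp only [List.mem_singleton] at h; subst h
                rw [hj] at he; exact Or.inl (Option.some.inj he).symm)
        (hposStep c hpos j)
        (pvNodupKeysModify c j _ hnodup)
      rw [List.append_assoc, List.singleton_append] at hres
      exact hres
    · -- fresh ngram: inserted with id n, index bumped, counter bumped at n
      have hgn : d.get? g = none := by
        rw [PySem.Dict.get?_eq_none_iff_contains]; simpa using hc
      have hstep : pvAStepNgram (d, n, c) g = (d.insert g n, n + 1, c.modify n 0 (· + 1)) := by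
        simp [pvAStepNgram, hc, PySem.Dict.get?_insert_self]
      rw [hstep]
      have hinv' : pvInv d0 n0 (d.insert g n) (n + 1) := by
        refine ⟨?_, ?_, ?_, by omega⟩
        · intro g' i h
          rw [PySem.Dict.get?_insert] at h
          by_cases hgg : g' = g
          · rw [if_pos hgg] at h
            have : n = i := Option.some.inj h
            exact Or.inr ⟨by omega, by omega⟩
          · rw [if_neg hgg] at h
            rcases hi1 g' i h with h' | h'
            · exact Or.inl h'
            · exact Or.inr ⟨h'.1, by omega⟩
        · intro g' i h0
          have hd := hext0 g' i h0
          rw [PySem.Dict.get?_insert]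
          by_cases hgg : g' = g
          · subst hgg; rw [hd] at hgn; cases hgn
          · rw [if_neg hgg]; exact hd
        · intro g1 g2 i hn0i h1 h2
          rw [PySem.Dict.get?_insert] at h1 h2
          by_cases e1 : g1 = g <;> by_cases e2 : g2 = g
          · rw [e1, e2]
          · exfalso
            rw [if_pos e1] at h1; rw [if_neg e2] at h2
            have hin : n = i := Option.some.inj h1
            subst hin
            rcases hi1 g2 n h2 with h' | h'
            · have := hd0 g2 n h'; omega
            · omega
          · exfalso
            rw [if_pos e2] at h2; rw [if_neg e1] at h1
            have hin : n = i := Option.some.inj h2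
            subst hin
            rcases hi1 g1 n h1 with h' | h'
            · have := hd0 g1 n h'; omega
            · omega
          · rw [if_neg e1] at h1; rw [if_neg e2] at h2
            exact hinj g1 g2 i hn0i h1 h2
      have hres := ih (d.insert g n) (n + 1) (c.modify n 0 (· + 1)) (P ++ [g]) hinv'
        (by intro g' hg'
            rw [PySem.Dict.get?_insert]
            by_cases hgg : g' = g
            · rw [if_pos hgg]; rfl
            · rw [if_neg hgg]
              rcases List.mem_append.mp hg' with h | h
              · exact hdom g' h
              · simp only [List.mem_singleton] at h; exact absurd h hgg)
        (by intro i
            rw [pvMemKeysModify]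
            constructor
            · rintro (rfl | hi)
              · exact ⟨g, by simp, PySem.Dict.get?_insert_self d g i⟩
              · obtain ⟨g', hg', he⟩ := (hchar i).mp hi
                have hgg : g' ≠ g := by
                  intro e; rw [e, hgn] at he; cases he
                refine ⟨g', by simp [hg'], ?_⟩
                rw [PySem.Dict.get?_insert, if_neg hgg]; exact he
            · rintro ⟨g', hg', he⟩
              rcases List.mem_append.mp hg' with h | h
              · have hgg : g' ≠ g := by
                  intro e
                  have := hdom g' h
                  rw [e, hgn] at this; cases this
                rw [PySem.Dict.get?_insert, if_neg hgg] at he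
                exact Or.inr ((hchar i).mpr ⟨g', h, he⟩)
              · simp only [List.mem_singleton] at h; subst h
                rw [PySem.Dict.get?_insert_self] at he
                exact Or.inl (Option.some.inj he).symm)
        (hposStep c hpos n)
        (pvNodupKeysModify c n _ hnodup)
      rw [List.append_assoc, List.singleton_append] at hres
      refine ⟨hres.1, ?_, hres.2.2⟩
      intro g' i h
      have hgg : g' ≠ g := by intro e; rw [e, hgn] at h; cases h
      exact hres.2.1 g' i (by rw [PySem.Dict.get?_insert, if_neg hgg]; exact h)

-- tokens: a final id is either a cluster id or names a fresh (unclustered) n-gram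
inductive PvToken
  | cid : Int → PvToken
  | raw : String → PvToken
deriving DecidableEq, Repr

def pvTok (cmap : PySem.Dict String Int) (g : String) : PvToken :=
  match cmap.get? g with
  | some i => PvToken.cid i
  | none => PvToken.raw g

def pvIdOf (F : String → Int) : PvToken → Int
  | PvToken.cid i => i
  | PvToken.raw g => F g

-- the two halves of a string's token set, as finsets
def pvCI (cmap : PySem.Dict String Int) (S : List String) : Finset Int :=
  (S.filterMap (fun g => cmap.get? g)).toFinset

def pvRA (cmap : PySem.Dict String Int) (S : List String) : Finset String :=
  (S.filter (fun g => (cmap.get? g).isNone)).toFinset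

lemma mem_pvCI (cmap : PySem.Dict String Int) (S : List String) (i : Int) :
    i ∈ pvCI cmap S ↔ ∃ g ∈ S, cmap.get? g = some i := by
  simp [pvCI, List.mem_filterMap]

lemma mem_pvRA (cmap : PySem.Dict String Int) (S : List String) (g : String) :
    g ∈ pvRA cmap S ↔ g ∈ S ∧ cmap.get? g = none := by
  simp [pvRA, Option.isNone_iff_eq_none]

lemma pvImageT (cmap : PySem.Dict String Int) (S : List String) :
    S.toFinset.image (pvTok cmap)
      = (pvCI cmap S).image PvToken.cid ∪ (pvRA cmap S).image PvToken.raw := by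
  ext t
  simp only [Finset.mem_image, Finset.mem_union, List.mem_toFinset, mem_pvCI, mem_pvRA]
  constructor
  · rintro ⟨g, hg, rfl⟩
    cases h : cmap.get? g with
    | some c => exact Or.inl ⟨c, ⟨g, hg, h⟩, by simp [pvTok, h]⟩
    | none => exact Or.inr ⟨g, ⟨hg, h⟩, by simp [pvTok, h]⟩
  · rintro (⟨c, ⟨g, hg, h⟩, rfl⟩ | ⟨g, ⟨hg, h⟩, rfl⟩)
    · exact ⟨g, hg, by simp [pvTok, h]⟩
    · exact ⟨g, hg, by simp [pvTok, h]⟩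

lemma pvCid_inj : Function.Injective PvToken.cid := fun a b h => by injection h

lemma pvRaw_inj : Function.Injective PvToken.raw := fun a b h => by injection h

-- the token intersection splits into cluster-id and raw parts
lemma pvInterCard (cmap : PySem.Dict String Int) (X Y : List String) :
    (X.toFinset.image (pvTok cmap) ∩ Y.toFinset.image (pvTok cmap)).card
      = (pvCI cmap X ∩ pvCI cmap Y).card + (pvRA cmap X ∩ pvRA cmap Y).card := by
  rw [pvImageT, pvImageT]
  have hsplit : ((pvCI cmap X).image PvToken.cid ∪ (pvRA cmap X).image PvToken.raw)
        ∩ ((pvCI cmap Y).image PvToken.cid ∪ (pvRA cmap Y).image PvToken.raw)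
      = ((pvCI cmap X).image PvToken.cid ∩ (pvCI cmap Y).image PvToken.cid)
        ∪ ((pvRA cmap X).image PvToken.raw ∩ (pvRA cmap Y).image PvToken.raw) := by
    ext t
    simp only [Finset.mem_inter, Finset.mem_union, Finset.mem_image]
    constructor
    · rintro ⟨(⟨c, hc, rfl⟩ | ⟨g, hg, rfl⟩), (⟨c', hc', he⟩ | ⟨g', hg', he⟩)⟩
      · exact Or.inl ⟨⟨c, hc, rfl⟩, ⟨c', hc', he⟩⟩
      · exact absurd he (by intro h; cases h)
      · exact absurd he (by intro h; cases h)
      · exact Or.inr ⟨⟨g, hg, rfl⟩, ⟨g', hg', he⟩⟩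
    · rintro (⟨h1, h2⟩ | ⟨h1, h2⟩)
      · exact ⟨Or.inl h1, Or.inl h2⟩
      · exact ⟨Or.inr h1, Or.inr h2⟩
  rw [hsplit, Finset.card_union_of_disjoint (by
    rw [Finset.disjoint_left]
    rintro t ht1 ht2
    obtain ⟨c, _, rfl⟩ := Finset.mem_image.mp (Finset.mem_inter.mp ht1).1
    obtain ⟨g, _, he⟩ := Finset.mem_image.mp (Finset.mem_inter.mp ht2).1
    exact PvToken.noConfusion he)]
  rw [← Finset.image_inter _ _ pvCid_inj, ← Finset.image_inter _ _ pvRaw_inj,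
    Finset.card_image_of_injective _ pvCid_inj, Finset.card_image_of_injective _ pvRaw_inj]

lemma pvToFinsetMap {α β : Type} [DecidableEq α] [DecidableEq β] (l : List α) (f : α → β) :
    (l.map f).toFinset = l.toFinset.image f := by
  induction l with
  | nil => simp
  | cons x t ih => simp [ih]

lemma pvFilterLen {α : Type} [DecidableEq α] (K : List α) (p : α → Bool) (h : K.Nodup) :
    (K.filter p).length = (K.toFinset.filter (fun i => p i = true)).card := by
  rw [← List.toFinset_filter, List.toFinset_card_of_nodup (h.filter p)]

lemma pvCount (X Y : List String) (F : String → Int) (T : String → PvToken)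
    (hcomp : ∀ g1 ∈ X ++ Y, ∀ g2 ∈ X ++ Y, (F g1 = F g2 ↔ T g1 = T g2))
    (hid : ∀ g ∈ X ++ Y, pvIdOf F (T g) = F g)
    (K1 K2 : List Int)
    (hK1 : ∀ i, i ∈ K1 ↔ i ∈ X.map F) (hK2 : ∀ i, i ∈ K2 ↔ i ∈ Y.map F)
    (hN1 : K1.Nodup) :
    (K1.filter (fun i => decide (i ∈ K2))).length
      = (X.toFinset.image T ∩ Y.toFinset.image T).card := by
  have eK1 : K1.toFinset = X.toFinset.image F := by
    rw [← pvToFinsetMap]; ext i; simp only [List.mem_toFinset]; exact hK1 i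
  have eK2 : K2.toFinset = Y.toFinset.image F := by
    rw [← pvToFinsetMap]; ext i; simp only [List.mem_toFinset]; exact hK2 i
  have hL : (K1.filter (fun i => decide (i ∈ K2))).length
      = (X.toFinset.image F ∩ Y.toFinset.image F).card := by
    rw [pvFilterLen _ _ hN1]
    congr 1
    rw [← eK1, ← eK2]
    ext i
    simp [List.mem_toFinset]
  rw [hL]
  have hidX : X.toFinset.image F = (X.toFinset.image T).image (pvIdOf F) := by
    rw [Finset.image_image]
    exact (Finset.image_congr (fun g hg => (hid g (by
      simp only [List.coe_toFinset, Set.mem_setOf_eq] at hg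
      exact List.mem_append.mpr (Or.inl (by simpa using hg)))).symm))
  have hidY : Y.toFinset.image F = (Y.toFinset.image T).image (pvIdOf F) := by
    rw [Finset.image_image]
    exact (Finset.image_congr (fun g hg => (hid g (by
      simp only [List.coe_toFinset, Set.mem_setOf_eq] at hg
      exact List.mem_append.mpr (Or.inr (by simpa using hg)))).symm))
  have hinj : Set.InjOn (pvIdOf F) (↑(X.toFinset.image T) ∪ ↑(Y.toFinset.image T)) := by
    intro t1 h1 t2 h2 he
    have hget : ∀ t ∈ (↑(X.toFinset.image T) ∪ ↑(Y.toFinset.image T) : Set PvToken),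
        ∃ g ∈ X ++ Y, T g = t := by
      intro t ht
      rcases ht with ht | ht
      · obtain ⟨g, hg, hT⟩ := Finset.mem_image.mp ht
        exact ⟨g, List.mem_append.mpr (Or.inl (List.mem_toFinset.mp hg)), hT⟩
      · obtain ⟨g, hg, hT⟩ := Finset.mem_image.mp ht
        exact ⟨g, List.mem_append.mpr (Or.inr (List.mem_toFinset.mp hg)), hT⟩
    obtain ⟨g1, hg1, rfl⟩ := hget t1 h1
    obtain ⟨g2, hg2, rfl⟩ := hget t2 h2
    rw [hid g1 hg1, hid g2 hg2] at he
    exact (hcomp g1 hg1 g2 hg2).mp he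
  rw [hidX, hidY, ← Finset.image_inter_of_injOn _ _ hinj]
  refine Finset.card_image_of_injOn (hinj.mono ?_)
  intro t ht
  simp only [Finset.coe_inter, Set.mem_inter_iff] at ht
  exact Or.inl ht.1

lemma pvMain (string1 string2 : String) (mn mx : Int) (clusters : List (List String)) :
    compute_kernel_two_strings_clusters2 string1 string2 mn mx clusters
      = compute_kernel_two_strings_clusters2_alt string1 string2 mn mx clusters := by
  simp only [compute_kernel_two_strings_clusters2, compute_kernel_two_strings_clusters2_alt,
    pvPhase1_eq clusters PySem.Dict.empty 0, pvFoldA_flatten, pvParts_eq, zero_add]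
  set cmap := (PySem.List.enumerate clusters).foldl
    (fun d p => p.2.foldl (fun d ngram => d.insert ngram p.1) d) PySem.Dict.empty with hcm
  set n0 : Int := (clusters.length : Int) with hn0
  set X := pvNgrams mn mx string1 with hX
  set Y := pvNgrams mn mx string2 with hY
  set r1 := X.foldl pvAStepNgram (cmap, n0, PySem.Dict.empty) with hr1
  set r2 := Y.foldl pvAStepNgram (r1.1, r1.2.1, PySem.Dict.empty) with hr2
  have hd0 : ∀ g i, cmap.get? g = some i → 0 ≤ i ∧ i < n0 := by
    intro g i h
    rw [hcm] at h
    rcases pvVal2 _ _ _ _ h with ⟨p, hp, rfl⟩ | h'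
    · have := pvMemEnumerate clusters 0 p hp
      omega
    · simp [PySem.Dict.get?_empty] at h'
  have hinv0 : pvInv cmap n0 cmap n0 :=
    ⟨fun g i h => Or.inl h, fun g i h => h,
     fun g1 g2 i hn h1 h2 => absurd (hd0 g1 i h1).2 (by omega), le_refl n0⟩
  have H1 := pvFoldA_inv cmap n0 hd0 X cmap n0 PySem.Dict.empty [] hinv0
    (by intro g hg; cases hg)
    (by intro i; simp [PySem.Dict.keys_empty])
    (by intro i hi; simp [PySem.Dict.keys_empty] at hi)
    (by simp [PySem.Dict.keys_empty])
  rw [← hr1] at H1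
  simp only [List.nil_append] at H1
  obtain ⟨inv1, ext1, dom1, char1, pos1, nodup1⟩ := H1
  have H2 := pvFoldA_inv cmap n0 hd0 Y r1.1 r1.2.1 PySem.Dict.empty [] inv1
    (by intro g hg; cases hg)
    (by intro i; simp [PySem.Dict.keys_empty])
    (by intro i hi; simp [PySem.Dict.keys_empty] at hi)
    (by simp [PySem.Dict.keys_empty])
  rw [← hr2] at H2
  simp only [List.nil_append] at H2
  obtain ⟨inv2, ext2, dom2, char2, pos2, nodup2⟩ := H2
  set F := fun g => (r2.1.get? g).getD 0 with hF
  set T := pvTok cmap with hT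
  have hFX : ∀ g ∈ X, r1.1.get? g = some (F g) ∧ r2.1.get? g = some (F g) := by
    intro g hg
    have h1 := dom1 g hg
    cases h : r1.1.get? g with
    | none => rw [h] at h1; cases h1
    | some j =>
      have h2 := ext2 g j h
      exact ⟨by simp [hF, h2], by simp [hF, h2]⟩
  have hFY : ∀ g ∈ Y, r2.1.get? g = some (F g) := by
    intro g hg
    have h1 := dom2 g hg
    cases h : r2.1.get? g with
    | none => rw [h] at h1; cases h1
    | some j => simp [hF, h]
  have hdomXY : ∀ g ∈ X ++ Y, r2.1.get? g = some (F g) := by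
    intro g hg
    rcases List.mem_append.mp hg with h | h
    · exact (hFX g h).2
    · exact hFY g h
  obtain ⟨i1, iext, iinj, _⟩ := inv2
  have hK1 : ∀ i, i ∈ r1.2.2.keys ↔ i ∈ X.map F := by
    intro i
    rw [char1 i]
    constructor
    · rintro ⟨g, hg, he⟩
      have := (hFX g hg).1
      rw [this] at he
      exact List.mem_map.mpr ⟨g, hg, Option.some.inj he⟩
    · intro hm
      obtain ⟨g, hg, rfl⟩ := List.mem_map.mp hm
      exact ⟨g, hg, (hFX g hg).1⟩
  have hK2 : ∀ i, i ∈ r2.2.2.keys ↔ i ∈ Y.map F := by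
    intro i
    rw [char2 i]
    constructor
    · rintro ⟨g, hg, he⟩
      have := hFY g hg
      rw [this] at he
      exact List.mem_map.mpr ⟨g, hg, Option.some.inj he⟩
    · intro hm
      obtain ⟨g, hg, rfl⟩ := List.mem_map.mp hm
      exact ⟨g, hg, hFY g hg⟩
  have hFcmap : ∀ g ∈ X ++ Y, ∀ a, cmap.get? g = some a → F g = a := by
    intro g hg a hc
    have e := hdomXY g hg
    have := iext g a hc
    rw [this] at e
    exact (Option.some.inj e).symm
  have hFfresh : ∀ g ∈ X ++ Y, cmap.get? g = none → n0 ≤ F g := by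
    intro g hg hc
    rcases i1 g (F g) (hdomXY g hg) with h' | h'
    · rw [hc] at h'; cases h'
    · exact h'.1
  have hcomp : ∀ g1 ∈ X ++ Y, ∀ g2 ∈ X ++ Y, (F g1 = F g2 ↔ T g1 = T g2) := by
    intro g1 h1 g2 h2
    cases hc1 : cmap.get? g1 with
    | some a =>
      have ha := hFcmap g1 h1 a hc1
      cases hc2 : cmap.get? g2 with
      | some b =>
        have hb := hFcmap g2 h2 b hc2
        simp [hT, pvTok, hc1, hc2, ha, hb]
      | none =>
        have hb := hFfresh g2 h2 hc2
        have ha' : F g1 < n0 := by have := hd0 g1 a hc1; omega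
        constructor
        · intro h; omega
        · intro h; simp [hT, pvTok, hc1, hc2] at h
    | none =>
      have ha := hFfresh g1 h1 hc1
      cases hc2 : cmap.get? g2 with
      | some b =>
        have hb := hFcmap g2 h2 b hc2
        have hb' : F g2 < n0 := by have := hd0 g2 b hc2; omega
        constructor
        · intro h; omega
        · intro h; simp [hT, pvTok, hc1, hc2] at h
      | none =>
        have hb := hFfresh g2 h2 hc2
        constructor
        · intro h
          have := iinj g1 g2 (F g1) ha (hdomXY g1 h1) (by rw [h]; exact hdomXY g2 h2)
          simp [hT, pvTok, hc2, this]
        · intro h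
          simp [hT, pvTok, hc1, hc2] at h
          rw [h]
  have hid : ∀ g ∈ X ++ Y, pvIdOf F (T g) = F g := by
    intro g hg
    cases hc : cmap.get? g with
    | some a =>
      have := hFcmap g hg a hc
      simp [hT, pvTok, hc, pvIdOf, this]
    | none => simp [hT, pvTok, hc, pvIdOf]
  have hcount := pvCount X Y F T hcomp hid r1.2.2.keys r2.2.2.keys hK1 hK2 nodup1
  -- A's counting loop
  rw [PySem.List.foldl_ite_add_one (fun c => r1.2.2.getD c 0 * r2.2.2.getD c 0 ≥ 1) r1.2.2.keys 0]
  have hcp : (r1.2.2.keys.countP fun c => decide (r1.2.2.getD c 0 * r2.2.2.getD c 0 ≥ 1))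
      = (r1.2.2.keys.countP fun i => decide (i ∈ r2.2.2.keys)) := by
    refine List.countP_congr ?_
    intro i hi
    simp only [decide_eq_true_eq]
    constructor
    · intro h
      by_contra hmem
      rw [PySem.Dict.getD_of_not_contains _ 0 (pvNotContainsOfNotMem _ _ hmem), mul_zero] at h
      omega
    · intro h
      have p1 := pos1 i hi
      have p2 := pos2 i h
      nlinarith
  -- B's two merges
  have hmergeC : pvMergeCount
        (PySem.List.sorted (X.foldl (pvStepC cmap) PySem.Set.empty) (fun x => x) false)
        (PySem.List.sorted (Y.foldl (pvStepC cmap) PySem.Set.empty) (fun x => x) false)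
      = ((pvCI cmap X ∩ pvCI cmap Y).card : Int) := by
    have hsort : ∀ (S : List String),
        (PySem.List.sorted (S.foldl (pvStepC cmap) PySem.Set.empty) (fun x => x) false).Pairwise (· < ·) ∧
        (PySem.List.sorted (S.foldl (pvStepC cmap) PySem.Set.empty) (fun x => x) false).toFinset
          = pvCI cmap S := by
      intro S
      have hnd : (S.foldl (pvStepC cmap) PySem.Set.empty).Nodup :=
        pvNodupFoldC cmap S _ List.nodup_nil
      have hperm := PySem.List.sorted_perm (S.foldl (pvStepC cmap) PySem.Set.empty)
        (fun x : Int => x) false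
      refine ⟨pvPairwiseLt _ (PySem.List.sorted_pairwise _ _) (hperm.nodup_iff.mpr hnd), ?_⟩
      ext i
      rw [List.mem_toFinset, PySem.List.mem_sorted, pvMemFoldC, mem_pvCI]
      simp [PySem.Set.empty]
    obtain ⟨hp1, he1⟩ := hsort X
    obtain ⟨hp2, he2⟩ := hsort Y
    rw [pvMergeCount_eq _ _ hp1 hp2, he1, he2]
  have hmergeR : pvMergeCount
        (PySem.List.sorted (X.foldl (pvStepR cmap) PySem.Set.empty) (fun x => x) false)
        (PySem.List.sorted (Y.foldl (pvStepR cmap) PySem.Set.empty) (fun x => x) false)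
      = ((pvRA cmap X ∩ pvRA cmap Y).card : Int) := by
    have hsort : ∀ (S : List String),
        (PySem.List.sorted (S.foldl (pvStepR cmap) PySem.Set.empty) (fun x => x) false).Pairwise (· < ·) ∧
        (PySem.List.sorted (S.foldl (pvStepR cmap) PySem.Set.empty) (fun x => x) false).toFinset
          = pvRA cmap S := by
      intro S
      have hnd : (S.foldl (pvStepR cmap) PySem.Set.empty).Nodup :=
        pvNodupFoldR cmap S _ List.nodup_nil
      have hperm := PySem.List.sorted_perm (S.foldl (pvStepR cmap) PySem.Set.empty)
        (fun x : String => x) false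
      refine ⟨pvPairwiseLt _ (PySem.List.sorted_pairwise _ _) (hperm.nodup_iff.mpr hnd), ?_⟩
      ext g
      rw [List.mem_toFinset, PySem.List.mem_sorted, pvMemFoldR, mem_pvRA]
      simp [PySem.Set.empty]
    obtain ⟨hp1, he1⟩ := hsort X
    obtain ⟨hp2, he2⟩ := hsort Y
    rw [pvMergeCount_eq _ _ hp1 hp2, he1, he2]
  rw [hmergeC, hmergeR, hcp, List.countP_eq_length_filter, hcount, pvInterCard]
  push_cast
  ring

-- ===== VERDICT (by name: the statement is the Claim_ definition above) =====
theorem compute_kernel_two_strings_clusters2_spec : Claim_equal_compute_kernel_two_strings_clusters2 := by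
  intro s1 s2 mn mx clusters _
  exact pvMain s1 s2 mn mx clusters
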